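-- pv_equiv track=rewrite | github.com/wq-will/SimpleTES | datasets/znaa/znaa/utils_ae.py | _asap
-- ===== SOURCE A (Python) =====
-- def _asap(g_q: list[list[int]], n_q: int) -> list[list[int]]:
--     layers, q_time = [], [0] * n_q
--     for gate_idx, (q0, q1) in enumerate(g_q):
--         layer = max(q_time[q0], q_time[q1])
--         if layer >= len(layers):
--             layers.append([])
--         layers[layer].append(gate_idx)
--         q_time[q0] = layer + 1
--         q_time[q1] = layer + 1
--     return layers
-- ===== SOURCE B (Python) =====
-- def _last_use(done, q):
--     """Earliest layer available for qubit q: 1 + layer of the most recent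
--     scheduled gate acting on q, or 0 if q is untouched so far."""
--     for (c, d), lay in reversed(done):
--         if q == c or q == d:
--             return lay + 1
--     return 0
--
--
-- def _asap(g_q: list[list[int]], n_q: int) -> list[list[int]]:
--     # Phase 1: assign each gate a layer by scanning backwards for the most
--     # recent gate sharing a qubit (no per-qubit time array is kept).
--     done = []  # list of ((q0, q1), layer)
--     for q0, q1 in g_q:
--         layer = max(_last_use(done, q0), _last_use(done, q1))
--         done.append(((q0, q1), layer))
--     # Phase 2: group gate indices by layer.
--     gl = [lay for _, lay in done]
--     layers = [[] for _ in range(max(gl, default=-1) + 1)]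
--     for i, lay in enumerate(gl):
--         layers[lay].append(i)
--     return layers
-- ===== Notes on version B (the rewrite author's own statement) =====
-- stated objective: alternative
-- what changed: B replaces A's per-qubit time array and in-loop layer placement by a backward scan over already-scheduled gates for the most recent gate sharing a qubit, then groups gate indices into layers in a separate second pass; Pre_ restricts to the task's natural domain of qubit indices 0 <= q < n_q, excluding malformed gates (negative or out-of-range indices), where A's value, when it returns one, comes from Python's negative list indexing into q_time.
-- outside the precondition, e.g. on _asap([[-1, 0], [2, 1]], 3): A returns [[0], [1]], B returns [[0, 1]]
import Mathlib
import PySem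

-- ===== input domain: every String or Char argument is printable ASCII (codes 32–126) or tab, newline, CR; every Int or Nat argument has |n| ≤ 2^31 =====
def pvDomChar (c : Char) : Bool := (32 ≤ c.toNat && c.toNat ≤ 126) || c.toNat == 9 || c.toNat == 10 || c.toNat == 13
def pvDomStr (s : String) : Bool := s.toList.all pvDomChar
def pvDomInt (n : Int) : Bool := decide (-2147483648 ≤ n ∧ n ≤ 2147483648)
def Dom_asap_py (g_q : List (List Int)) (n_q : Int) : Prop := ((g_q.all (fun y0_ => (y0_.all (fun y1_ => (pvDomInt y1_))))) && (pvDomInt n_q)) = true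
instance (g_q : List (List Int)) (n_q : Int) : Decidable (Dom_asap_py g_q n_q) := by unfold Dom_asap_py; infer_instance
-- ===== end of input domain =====

-- B schedules each gate by scanning backwards for the most recent gate sharing a qubit
-- (no per-qubit time array) and groups gate indices into layers in a separate second pass;
-- objective: an alternative algorithm of a genuinely different shape (not faster).

-- ===== PORT A =====
-- one iteration of A's loop; state = (layers, q_time)
def asapStep (st : List (List Int) × List Int) (ig : Int × List Int) : List (List Int) × List Int :=
  let q0 := PySem.List.pyGetD ig.2 0 0      -- unpacking (q0, q1) = gate
  let q1 := PySem.List.pyGetD ig.2 1 0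
  let layer := max (PySem.List.pyGetD st.2 q0 0) (PySem.List.pyGetD st.2 q1 0)
  let layers := if (st.1.length : Int) ≤ layer then st.1 ++ [[]] else st.1
  let layers := PySem.List.pySetD layers layer (PySem.List.pyGetD layers layer [] ++ [ig.1])
  let q_time := PySem.List.pySetD st.2 q0 (layer + 1)
  let q_time := PySem.List.pySetD q_time q1 (layer + 1)
  (layers, q_time)

def asap_py (g_q : List (List Int)) (n_q : Int) : List (List Int) :=
  ((PySem.List.enumerate g_q 0).foldl asapStep ([], List.replicate n_q.toNat 0)).1

-- ===== PORT B =====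
-- _last_use: scan `done` backwards for the most recent gate acting on q
def lastUse (done : List ((Int × Int) × Int)) (q : Int) : Int :=
  match done.reverse.find? (fun e => q == e.1.1 || q == e.1.2) with
  | some e => e.2 + 1
  | none => 0

-- one iteration of B's phase-1 loop
def schedStep (done : List ((Int × Int) × Int)) (g : List Int) : List ((Int × Int) × Int) :=
  let q0 := PySem.List.pyGetD g 0 0      -- unpacking q0, q1 = gate
  let q1 := PySem.List.pyGetD g 1 0
  done ++ [((q0, q1), max (lastUse done q0) (lastUse done q1))]

-- one iteration of B's phase-2 grouping loop: layers[lay].append(i)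
def fillStep (ls : List (List Int)) (il : Int × Int) : List (List Int) :=
  PySem.List.pySetD ls il.2 (PySem.List.pyGetD ls il.2 [] ++ [il.1])

def asap_py_alt (g_q : List (List Int)) (n_q : Int) : List (List Int) :=
  let done := g_q.foldl schedStep []
  let gl := done.map (·.2)
  let depth := ((PySem.List.max? gl (fun y => y)).getD (-1)) + 1   -- max(gl, default=-1) + 1
  (PySem.List.enumerate gl 0).foldl fillStep (List.replicate depth.toNat [])

-- ===== PRECONDITION & SPEC =====
-- Pre_ restricts to the task's natural domain: each gate unpacks to exactly two qubit
-- indices with 0 ≤ q < n_q. It excludes malformed gates (wrong arity, or negative /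
-- out-of-range indices): there A either raises (ValueError/IndexError) or, for
-- -n_q ≤ q < 0, returns a value produced by Python's negative list indexing into
-- q_time — malformed input outside the function's purpose, which B does not model.
def Pre_asap_py (g_q : List (List Int)) (n_q : Int) : Prop :=
  ∀ g ∈ g_q, g.length = 2 ∧ ∀ q ∈ g, 0 ≤ q ∧ q < n_q
instance (g_q : List (List Int)) (n_q : Int) : Decidable (Pre_asap_py g_q n_q) := by unfold Pre_asap_py; infer_instance

def pvWitness_asap_py : List (List Int) × Int := ([[0, 1], [1, 2], [0, 2]], 3)

def Spec_asap_py (g_q : List (List Int)) (n_q : Int) (out : List (List Int)) : Prop := out = asap_py_alt g_q n_q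
instance (g_q : List (List Int)) (n_q : Int) (out : List (List Int)) : Decidable (Spec_asap_py g_q n_q out) := by unfold Spec_asap_py; infer_instance

-- ===== CLAIM (what is proved, stated in full; the proofs are below) =====
def Claim_equal_asap_py : Prop := ∀ (g_q : List (List Int)) (n_q : Int), Dom_asap_py g_q n_q → Pre_asap_py g_q n_q → Spec_asap_py g_q n_q (asap_py g_q n_q)

-- ===== LEMMAS AND PROOFS =====

-- max(gl, default=-1)
def maxd (gl : List Int) : Int := (PySem.List.max? gl (fun y => y)).getD (-1)

-- grouping of a finished layer list (phase 2 of B, as a function of gl)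
def grp (gl : List Int) : List (List Int) :=
  (PySem.List.enumerate gl 0).foldl fillStep (List.replicate ((maxd gl) + 1).toNat [])

theorem lastUse_append (done : List ((Int × Int) × Int)) (a b L q : Int) :
    lastUse (done ++ [((a, b), L)]) q = if q = a ∨ q = b then L + 1 else lastUse done q := by
  unfold lastUse
  rw [List.reverse_append]
  simp only [List.reverse_singleton, List.singleton_append, List.find?_cons]
  by_cases h : q = a ∨ q = b
  · have : (q == a || q == b) = true := by
      rcases h with h | h <;> simp [h]
    simp [this, h]
  · push Not at h
    have : (q == a || q == b) = false := by simp [h.1, h.2]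
    simp [this, h]

theorem lastUse_nonneg (done : List ((Int × Int) × Int)) (q : Int)
    (h : ∀ e ∈ done, 0 ≤ e.2) : 0 ≤ lastUse done q := by
  unfold lastUse
  cases hf : done.reverse.find? (fun e => q == e.1.1 || q == e.1.2) with
  | none => simp
  | some e =>
    have he : e ∈ done := by
      have := List.mem_of_find?_eq_some hf
      simpa using this
    have := h e he
    dsimp only
    omega

theorem mem_le_maxd (gl : List Int) (x : Int) (hx : x ∈ gl) : x ≤ maxd gl := by
  unfold maxd
  cases hm : PySem.List.max? gl (fun y => y) with
  | none =>
    rw [PySem.List.max?_eq_none_iff] at hm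
    simp [hm] at hx
  | some m =>
    have := PySem.List.max?_isMax hm x hx
    simpa using this

theorem maxd_nonneg_aux (gl : List Int) (h : ∀ l ∈ gl, 0 ≤ l) : -1 ≤ maxd gl := by
  cases gl with
  | nil => simp [maxd, PySem.List.max?]
  | cons x t =>
    have hx : x ∈ x :: t := by simp
    have := mem_le_maxd (x :: t) x hx
    have := h x hx
    omega

theorem lastUse_le (done : List ((Int × Int) × Int)) (q : Int)
    (h : ∀ e ∈ done, 0 ≤ e.2) : lastUse done q ≤ maxd (done.map (·.2)) + 1 := by
  unfold lastUse
  cases hf : done.reverse.find? (fun e => q == e.1.1 || q == e.1.2) with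
  | none =>
    have := maxd_nonneg_aux (done.map (·.2))
      (fun l hl => by obtain ⟨e, he, rfl⟩ := List.mem_map.1 hl; exact h e he)
    dsimp only
    omega
  | some e =>
    have he : e ∈ done := by
      have := List.mem_of_find?_eq_some hf
      simpa using this
    have hm : e.2 ∈ done.map (·.2) := List.mem_map_of_mem he
    have := mem_le_maxd _ _ hm
    dsimp only
    omega

theorem maxd_append (gl : List Int) (L : Int) (hL : -1 ≤ L) :
    maxd (gl ++ [L]) = max (maxd gl) L := by
  cases gl with
  | nil => simp [maxd, PySem.List.max?]; omega
  | cons x t =>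
    have h1 : maxd ((x :: t) ++ [L]) = (t ++ [L]).foldl max x := by
      simp [maxd, PySem.List.max?_id_cons]
    have h2 : maxd (x :: t) = t.foldl max x := by
      simp [maxd, PySem.List.max?_id_cons]
    rw [h1, h2, List.foldl_append]
    simp

theorem length_fill (gl : List Int) (s : Int) (ls : List (List Int)) :
    ((PySem.List.enumerate gl s).foldl fillStep ls).length = ls.length := by
  induction gl generalizing s ls with
  | nil => simp [PySem.List.enumerate]
  | cons x t ih =>
    rw [PySem.List.enumerate_cons]
    simp only [List.foldl_cons]
    rw [ih]
    simp [fillStep, PySem.List.length_pySetD]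

theorem fillStep_append (ls pad : List (List Int)) (s x : Int)
    (h0 : 0 ≤ x) (h1 : x < (ls.length : Int)) :
    fillStep (ls ++ pad) (s, x) = fillStep ls (s, x) ++ pad := by
  unfold fillStep
  have hxl : x.toNat < ls.length := by omega
  have hget : PySem.List.pyGetD (ls ++ pad) x [] = PySem.List.pyGetD ls x [] := by
    rw [PySem.List.pyGetD_eq_getElem _ _ h0 (by simp; omega),
        PySem.List.pyGetD_eq_getElem _ _ h0 (by omega)]
    exact List.getElem_append_left _
  rw [hget, PySem.List.pySetD_of_nonneg _ _ h0, PySem.List.pySetD_of_nonneg _ _ h0,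
      List.set_append, if_pos hxl]

theorem fill_append_pad (gl : List Int) (s : Int) (ls pad : List (List Int))
    (h : ∀ l ∈ gl, 0 ≤ l ∧ l < (ls.length : Int)) :
    (PySem.List.enumerate gl s).foldl fillStep (ls ++ pad)
      = ((PySem.List.enumerate gl s).foldl fillStep ls) ++ pad := by
  induction gl generalizing s ls with
  | nil => simp [PySem.List.enumerate]
  | cons x t ih =>
    rw [PySem.List.enumerate_cons]
    simp only [List.foldl_cons]
    have hx := h x (by simp)
    rw [fillStep_append ls pad s x hx.1 hx.2, ih (s + 1) (fillStep ls (s, x))]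
    intro l hl
    have hb := h l (by simp [hl])
    have hlen : (fillStep ls (s, x)).length = ls.length := by
      simp [fillStep, PySem.List.length_pySetD]
    rw [hlen]
    exact hb

theorem grp_length (gl : List Int) : ((grp gl).length : Int) = (maxd gl + 1).toNat := by
  unfold grp
  rw [length_fill]
  simp

theorem grp_append (gl : List Int) (L : Int)
    (h0 : ∀ l ∈ gl, 0 ≤ l) (hL0 : 0 ≤ L) (hLe : L ≤ maxd gl + 1) :
    grp (gl ++ [L]) =
      fillStep (if ((grp gl).length : Int) ≤ L then grp gl ++ [[]] else grp gl)
        ((gl.length : Int), L) := by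
  have hmn : -1 ≤ maxd gl := maxd_nonneg_aux gl h0
  have hmd : maxd (gl ++ [L]) = max (maxd gl) L := maxd_append gl L (by omega)
  have hglen : ((grp gl).length : Int) = maxd gl + 1 := by
    rw [grp_length]; omega
  have hbound : ∀ l ∈ gl, 0 ≤ l ∧ l < ((List.replicate (maxd gl + 1).toNat ([] : List Int)).length : Int) := by
    intro l hl
    have := mem_le_maxd gl l hl
    have := h0 l hl
    simp [List.length_replicate]
    omega
  show (PySem.List.enumerate (gl ++ [L]) 0).foldl fillStep
      (List.replicate ((maxd (gl ++ [L])) + 1).toNat []) = _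
  rw [PySem.List.enumerate_append, List.foldl_append, hmd]
  simp only [PySem.List.enumerate_cons, PySem.List.enumerate_nil,
    List.foldl_cons, List.foldl_nil, zero_add]
  by_cases hc : L ≤ maxd gl
  · -- depth unchanged, no padding appended
    have h1 : max (maxd gl) L = maxd gl := by omega
    rw [h1, if_neg (by omega)]
    rfl
  · -- L = maxd gl + 1 : one new empty layer
    have h1 : max (maxd gl) L = L := by omega
    have h2 : (L + 1).toNat = (maxd gl + 1).toNat + 1 := by omega
    rw [h1, h2, if_pos (by omega), List.replicate_succ',
        fill_append_pad gl 0 _ _ hbound]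
    rfl

theorem asap_loop (rest : List (List Int)) (done : List ((Int × Int) × Int))
    (qt : List Int) (n_q : Int)
    (hq : qt.length = n_q.toNat)
    (hqt : ∀ m : Nat, (hm : m < qt.length) → qt[m] = lastUse done (m : Int))
    (hdone : ∀ e ∈ done, 0 ≤ e.2)
    (hpre : ∀ g ∈ rest, g.length = 2 ∧ ∀ q ∈ g, 0 ≤ q ∧ q < n_q) :
    ((PySem.List.enumerate rest (done.length : Int)).foldl asapStep
        (grp (done.map (·.2)), qt)).1
      = grp ((rest.foldl schedStep done).map (·.2)) := by
  induction rest generalizing done qt with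
  | nil => simp [PySem.List.enumerate]
  | cons g rest ih =>
    obtain ⟨hg2, hgq⟩ := hpre g (by simp)
    obtain ⟨x, y, rfl⟩ := List.length_eq_two.1 hg2
    obtain ⟨hx1, hx2⟩ := hgq x (by simp)
    obtain ⟨hy1, hy2⟩ := hgq y (by simp)
    have hn : 0 < n_q := by omega
    have hqlen : (qt.length : Int) = n_q := by omega
    -- reading q_time[q] equals lastUse at the same index
    have hread : ∀ (q : Int), 0 ≤ q → q < n_q →
        PySem.List.pyGetD qt q 0 = lastUse done q := by
      intro q h1 h2
      have hk : q.toNat < qt.length := by omega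
      rw [PySem.List.pyGetD_eq_getElem _ _ h1 (by omega), hqt _ hk]
      congr 1
      omega
    have hget0 : PySem.List.pyGetD [x, y] 0 0 = x := by
      simp [PySem.List.pyGetD, PySem.List.pyGet?, PySem.List.pyIdx?]
    have hget1 : PySem.List.pyGetD [x, y] 1 0 = y := by
      simp [PySem.List.pyGetD, PySem.List.pyGet?, PySem.List.pyIdx?]
    set L := max (lastUse done x) (lastUse done y) with hL
    have hL0 : 0 ≤ L := by
      have := lastUse_nonneg done x hdone
      omega
    have hLle : L ≤ maxd (done.map (·.2)) + 1 := by
      have h1 := lastUse_le done x hdone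
      have h2 := lastUse_le done y hdone
      omega
    -- the new q_time list
    set qt' := (qt.set x.toNat (L + 1)).set y.toNat (L + 1) with hqt'
    have hqt'len : qt'.length = qt.length := by simp [hqt']
    -- A's step equals (grp (gl ++ [L]), qt')
    have hstep : asapStep (grp (done.map (·.2)), qt) ((done.length : Int), [x, y])
        = (grp ((done.map (·.2)) ++ [L]), qt') := by
      unfold asapStep
      simp only [hget0, hget1]
      rw [hread x hx1 hx2, hread y hy1 hy2, ← hL]
      rw [grp_append (done.map (·.2)) L
        (fun l hl => by obtain ⟨e, he, rfl⟩ := List.mem_map.1 hl; exact hdone e he) hL0 hLle]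
      rw [PySem.List.pySetD_of_nonneg _ _ hx1, PySem.List.pySetD_of_nonneg _ _ hy1]
      simp only [List.length_map, Prod.mk.injEq]
      exact ⟨rfl, rfl⟩
    -- shift the fold one step
    rw [PySem.List.enumerate_cons, List.foldl_cons, hstep]
    have hdl : ((done.length : Int) + 1) = (((done ++ [((x, y), L)]).length : Int)) := by
      simp
    have hscheds : schedStep done [x, y] = done ++ [((x, y), L)] := by
      unfold schedStep
      simp only [hget0, hget1, ← hL]
    have hmap : (done.map (·.2)) ++ [L] = ((done ++ [((x, y), L)]).map (·.2)) := by
      simp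
    rw [hdl, hmap, List.foldl_cons, hscheds]
    exact ih (done ++ [((x, y), L)]) qt'
      (by omega)
      (by
        intro m hm
        rw [hqt'len] at hm
        have hval : qt'[m]'(by omega) =
            if y.toNat = m then L + 1 else if x.toNat = m then L + 1 else qt[m] := by
          simp only [hqt', List.getElem_set]
        rw [hval, lastUse_append]
        by_cases hc : (m : Int) = x ∨ (m : Int) = y
        · rw [if_pos hc]
          by_cases h1 : y.toNat = m
          · rw [if_pos h1]
          · rw [if_neg h1, if_pos (show x.toNat = m by omega)]
        · rw [if_neg (show ¬ y.toNat = m by omega),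
              if_neg (show ¬ x.toNat = m by omega), if_neg hc]
          exact hqt m hm)
      (by
        intro e he
        rcases List.mem_append.1 he with he | he
        · exact hdone e he
        · simp at he
          rw [he]
          exact hL0)
      (fun g hg => hpre g (by simp [hg]))

-- ===== VERDICT (by name: the statement is the Claim_ definition above) =====
theorem asap_py_spec : Claim_equal_asap_py := by
  intro g_q n_q _hdom hpre
  unfold Spec_asap_py
  have h0 : ∀ m : Nat, (hm : m < (List.replicate n_q.toNat (0 : Int)).length) →
      (List.replicate n_q.toNat (0 : Int))[m] = lastUse [] (m : Int) := by
    intro m hm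
    simp [lastUse]
  have h := asap_loop g_q [] (List.replicate n_q.toNat 0) n_q (by simp) h0 (by simp) hpre
  have hgrpnil : grp ([] : List Int) = [] := by
    simp [grp, maxd, PySem.List.max?, PySem.List.enumerate_nil]
  simp only [List.length_nil, Nat.cast_zero, List.map_nil, hgrpnil] at h
  exact h
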